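-- pv_equiv track=rewrite | github.com/lllub-19/Stego-Cleats | main.py | decode_chars
-- ===== SOURCE A (Python) =====
-- def even_or_odd_bit(num:int) -> str:
--     """
--         Purpose: Determines wheter the int is even or odd and returns a bit like stirng that corresponds
--         Arg: num (int) - a whole number
--         Returns: str - '1' if n is odd and '0' if n is even
--     """
--     if num % 2 != 0:
--         return '1'
--     else:
--         return '0'
--
-- def decode_single_char(color_values: list[int]) -> str:
--     """
--     Purpose: Decode list of 8 colors intensity numbers and then convert them into a single ASCII character.
--     Args: color_values (list[int]): 8 ints reperesenting color intensities
--     Returns: str: a single ASCII character that was decoded from the binary string, returns empty string if there is not 8 values.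
--     """
--     if len(color_values) != 8:
--         return ""
--
--     binary = ""
--     for number in color_values:
--         binary += even_or_odd_bit(number)
--
--     return chr(int(binary, 2))
--
-- def decode_chars(color_values: list[int], num_chars: int) -> str:
--     """
--     Purpose: Converts color values into a string of characters
--     Args:
--         color_values (list[int]) - are intenstiy values
--         num_chars (int) - # of characters to decode
--     Returns:
--         str - decoded characters
--         None - if input length is wrong
--     """
--
--     if len(color_values) != num_chars*8:
--         return None
--
--     result = ""
--     for character_number in range(num_chars):
--         start = character_number * 8
--         end = start + 8
--         group = color_values[start:end]
--         result = result + decode_single_char(group)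
--
--     return result
-- ===== SOURCE B (Python) =====
-- def decode_chars(color_values: list[int], num_chars: int) -> str:
--     """Single flat pass: integer accumulators per character instead of
--     slicing into 8-groups, building binary strings and parsing with int(,2)."""
--     if len(color_values) != num_chars * 8:
--         return None
--     codes = [0] * num_chars
--     for i, v in enumerate(color_values):
--         codes[i // 8] = codes[i // 8] * 2 + (v % 2 != 0)
--     return ''.join(map(chr, codes))
-- ===== Notes on version B (the rewrite author's own statement) =====
-- stated objective: simpler
-- what changed: Replaces A's nested structure (slice into 8-value groups, build a '0'/'1' binary string per group via a helper, parse it with int(binary, 2), concatenate chars) by one flat enumerate pass that accumulates integer codes in place (codes[i//8] = codes[i//8]*2 + parity) and a final join of chr over the codes.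
import Mathlib
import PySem

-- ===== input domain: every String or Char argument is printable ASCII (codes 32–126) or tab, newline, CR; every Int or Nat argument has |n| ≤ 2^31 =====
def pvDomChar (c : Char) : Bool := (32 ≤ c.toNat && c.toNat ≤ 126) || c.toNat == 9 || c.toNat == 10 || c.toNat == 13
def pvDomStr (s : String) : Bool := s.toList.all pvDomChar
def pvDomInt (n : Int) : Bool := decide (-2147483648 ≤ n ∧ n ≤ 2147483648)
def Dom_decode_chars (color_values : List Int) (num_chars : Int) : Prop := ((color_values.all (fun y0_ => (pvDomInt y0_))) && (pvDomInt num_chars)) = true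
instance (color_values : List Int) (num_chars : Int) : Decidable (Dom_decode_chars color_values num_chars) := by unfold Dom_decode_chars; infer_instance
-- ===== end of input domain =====

-- B replaces A's slice-into-8-groups / per-group binary-string / int(,2) pipeline by one
-- flat indexed pass over enumerate(color_values) accumulating integer codes (objective: simpler).

-- ===== PORT A =====
def even_or_odd_bit (num : Int) : String :=
  if PySem.Int.mod num 2 ≠ 0 then "1" else "0"

-- Python str carried as List Char (exact here: strings are only built by concatenation and chr)
def decode_single_char (color_values : List Int) : List Char :=
  if color_values.length ≠ 8 then []
  else
    let binary := color_values.foldl (fun b number => b ++ (even_or_odd_bit number).toList) []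
    -- int(binary, 2): hand-ported base-2 digit fold, exact on strings of '0'/'1' digits
    let v := binary.foldl (fun acc c => acc * 2 + (if c = '1' then (1 : Int) else 0)) 0
    [Char.ofNat v.toNat]

def decode_chars (color_values : List Int) (num_chars : Int) : Option String :=
  if (color_values.length : Int) ≠ num_chars * 8 then none
  else some (String.ofList ((PySem.List.pyRange 0 num_chars 1).foldl
    (fun result character_number =>
      let start := character_number * 8
      let stop := start + 8
      let group := PySem.List.slice color_values (some start) (some stop)
      result ++ decode_single_char group) []))

-- ===== PORT B =====
def decode_chars_alt (color_values : List Int) (num_chars : Int) : Option String :=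
  if (color_values.length : Int) ≠ num_chars * 8 then none
  else
    let codes := (PySem.List.enumerate color_values 0).foldl
      (fun (codes : List Int) p =>
        let j := (PySem.Int.floordiv p.1 8).toNat  -- i // 8; i ≥ 0 here, so toNat is exact
        codes.set j (codes.getD j 0 * 2 + (if PySem.Int.mod p.2 2 ≠ 0 then 1 else 0)))
      (List.replicate num_chars.toNat 0)  -- [0] * num_chars
    some (String.ofList (codes.map (fun c => Char.ofNat c.toNat)))

-- ===== PRECONDITION & SPEC =====
def Spec_decode_chars (color_values : List Int) (num_chars : Int) (out : Option String) : Prop := out = decode_chars_alt color_values num_chars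
instance (color_values : List Int) (num_chars : Int) (out : Option String) : Decidable (Spec_decode_chars color_values num_chars out) := by unfold Spec_decode_chars; infer_instance

-- ===== CLAIM (what is proved, stated in full; the proofs are below) =====
def Claim_equal_decode_chars : Prop := ∀ (color_values : List Int) (num_chars : Int), Dom_decode_chars color_values num_chars → Spec_decode_chars color_values num_chars (decode_chars color_values num_chars)

-- ===== LEMMAS AND PROOFS =====

-- parity bit of one colour value, as an integer
def pvBit (v : Int) : Int := if PySem.Int.mod v 2 ≠ 0 then 1 else 0

-- reference result: the integer code of each 8-value chunk, in order
def pvChunkVals : List Int → List Int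
  | a :: b :: c :: d :: e :: f :: g :: h :: t =>
      (((((((pvBit a * 2 + pvBit b) * 2 + pvBit c) * 2 + pvBit d) * 2 + pvBit e) * 2
          + pvBit f) * 2 + pvBit g) * 2 + pvBit h) :: pvChunkVals t
  | _ => []

-- B's loop body, named for the proofs (definitionally the lambda in decode_chars_alt)
def pvStepB (codes : List Int) (p : Int × Int) : List Int :=
  let j := (PySem.Int.floordiv p.1 8).toNat
  codes.set j (codes.getD j 0 * 2 + (if PySem.Int.mod p.2 2 ≠ 0 then 1 else 0))

theorem pv_slice_drop8 (a b c d e f g h : Int) (t : List Int) (p q : Int)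
    (hp : 0 ≤ p) (hq : 0 ≤ q) :
    PySem.List.slice (a :: b :: c :: d :: e :: f :: g :: h :: t) (some (p + 8)) (some (q + 8))
    = PySem.List.slice t (some p) (some q) := by
  rw [PySem.List.slice_toNat _ (by omega) (by omega), PySem.List.slice_toNat _ hp hq]
  have h3 : (q + 8).toNat - (p + 8).toNat = q.toNat - p.toNat := by omega
  have h1 : (p + 8).toNat = p.toNat + 8 := by omega
  rw [h3, h1, ← List.drop_drop]
  simp

theorem pv_eood_toList (x : Int) :
    (even_or_odd_bit x).toList = [if PySem.Int.mod x 2 ≠ 0 then '1' else '0'] := by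
  unfold even_or_odd_bit; split_ifs <;> simp

theorem pv_ifchar (x : Int) :
    (if (if PySem.Int.mod x 2 ≠ 0 then '1' else '0') = '1' then (1 : Int) else 0) = pvBit x := by
  unfold pvBit; split_ifs <;> simp_all

theorem pv_dsc8 (a b c d e f g h : Int) :
    decode_single_char [a, b, c, d, e, f, g, h]
    = [Char.ofNat ((((((((pvBit a * 2 + pvBit b) * 2 + pvBit c) * 2 + pvBit d) * 2 + pvBit e) * 2
          + pvBit f) * 2 + pvBit g) * 2 + pvBit h)).toNat] := by
  simp only [decode_single_char, List.length_cons, List.length_nil, List.foldl_cons,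
    List.foldl_nil, List.nil_append, pv_eood_toList, List.cons_append, pv_ifchar]
  norm_num [pv_ifchar]

-- A's loop, written as a flatMap over the chunk indices, equals the reference
theorem pv_A : ∀ (n : Nat) (l : List Int), l.length = 8 * n →
    (List.range n).flatMap (fun k : Nat => decode_single_char
      (PySem.List.slice l (some ((k : Int) * 8)) (some ((k : Int) * 8 + 8))))
    = (pvChunkVals l).map (fun v => Char.ofNat v.toNat) := by
  intro n
  induction n with
  | zero =>
    intro l hl
    have : l = [] := by cases l <;> simp_all
    subst this; simp [pvChunkVals]
  | succ n ih =>
    intro l hl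
    match l, hl with
    | a :: b :: c :: d :: e :: f :: g :: h :: t, hl =>
      have ht : t.length = 8 * n := by simp at hl; omega
      rw [List.range_succ_eq_map, List.flatMap_cons, List.flatMap_map]
      have hhead : PySem.List.slice (a :: b :: c :: d :: e :: f :: g :: h :: t)
          (some ((0 : Nat) * 8 : Int)) (some (((0 : Nat) * 8 : Int) + 8)) = [a, b, c, d, e, f, g, h] := by
        norm_num
        rw [PySem.List.slice_to _ (by norm_num)]
        simp
      have htail : (fun k : Nat => decode_single_char
            (PySem.List.slice (a :: b :: c :: d :: e :: f :: g :: h :: t)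
              (some ((((k + 1 : Nat)) : Int) * 8)) (some (((k + 1 : Nat) : Int) * 8 + 8))))
          = (fun k : Nat => decode_single_char
            (PySem.List.slice t (some ((k : Int) * 8)) (some ((k : Int) * 8 + 8)))) := by
        funext k
        have e1 : (((k + 1 : Nat)) : Int) * 8 = (k : Int) * 8 + 8 := by push_cast; ring
        rw [e1, pv_slice_drop8 _ _ _ _ _ _ _ _ _ _ _ (by positivity) (by positivity)]
      rw [hhead, htail, ih t ht, pv_dsc8]
      simp [pvChunkVals]

-- B's fold ignores a finalized head cell once the running index has moved past it
theorem pv_shift : ∀ (t : List Int) (s : Int), 0 ≤ s → ∀ (x : Int) (codes : List Int),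
    (PySem.List.enumerate t (s + 8)).foldl pvStepB (x :: codes)
    = x :: (PySem.List.enumerate t s).foldl pvStepB codes := by
  intro t
  induction t with
  | nil => intro s hs x codes; simp [PySem.List.enumerate_nil]
  | cons v t ih =>
    intro s hs x codes
    rw [PySem.List.enumerate_cons, PySem.List.enumerate_cons]
    simp only [List.foldl_cons]
    have hfd : PySem.Int.floordiv (s + 8) 8 = PySem.Int.floordiv s 8 + 1 := by
      rw [PySem.Int.floordiv_eq_ediv_of_pos (by norm_num), PySem.Int.floordiv_eq_ediv_of_pos (by norm_num)]
      omega
    have hnn : 0 ≤ PySem.Int.floordiv s 8 := by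
      rw [PySem.Int.floordiv_eq_ediv_of_pos (by norm_num)]; omega
    have hto : (PySem.Int.floordiv (s + 8) 8).toNat = (PySem.Int.floordiv s 8).toNat + 1 := by
      rw [hfd]; omega
    show (PySem.List.enumerate t (s + 8 + 1)).foldl pvStepB (pvStepB (x :: codes) (s + 8, v)) = _
    have hstep : pvStepB (x :: codes) (s + 8, v) = x :: pvStepB codes (s, v) := by
      simp only [pvStepB, hto]
      simp [List.set_cons_succ]
    rw [hstep]
    have h2 : s + 8 + 1 = (s + 1) + 8 := by ring
    rw [h2, ih (s + 1) (by omega)]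

theorem pv_step_small : ∀ (i : Int), 0 ≤ i → i < 8 → ∀ (x v : Int) (rest : List Int),
    pvStepB (x :: rest) (i, v) = (x * 2 + pvBit v) :: rest := by
  intro i h1 h2 x v rest
  have hz : (i / 8).toNat = 0 := by omega
  simp [pvStepB, pvBit, hz]

-- B's flat fold equals the reference
theorem pv_B : ∀ (n : Nat) (l : List Int), l.length = 8 * n →
    (PySem.List.enumerate l 0).foldl pvStepB (List.replicate n 0) = pvChunkVals l := by
  intro n
  induction n with
  | zero =>
    intro l hl
    have : l = [] := by cases l <;> simp_all
    subst this; simp [PySem.List.enumerate_nil, pvChunkVals]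
  | succ n ih =>
    intro l hl
    match l, hl with
    | a :: b :: c :: d :: e :: f :: g :: h :: t, hl =>
      have ht : t.length = 8 * n := by simp at hl; omega
      simp only [PySem.List.enumerate_cons, List.foldl_cons]
      norm_num
      rw [List.replicate_succ,
        pv_step_small 0 (by norm_num) (by norm_num),
        pv_step_small 1 (by norm_num) (by norm_num),
        pv_step_small 2 (by norm_num) (by norm_num),
        pv_step_small 3 (by norm_num) (by norm_num),
        pv_step_small 4 (by norm_num) (by norm_num),
        pv_step_small 5 (by norm_num) (by norm_num),
        pv_step_small 6 (by norm_num) (by norm_num),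
        pv_step_small 7 (by norm_num) (by norm_num)]
      have h8 : (8 : Int) = 0 + 8 := by norm_num
      rw [h8, pv_shift t 0 le_rfl, ih t ht]
      simp [pvChunkVals]

-- ===== VERDICT (by name: the statement is the Claim_ definition above) =====
theorem decode_chars_spec : Claim_equal_decode_chars := by
  intro cv nc _
  unfold Spec_decode_chars decode_chars decode_chars_alt
  by_cases hg : (cv.length : Int) ≠ nc * 8
  · rw [if_pos hg, if_pos hg]
  · rw [if_neg hg, if_neg hg]
    rw [not_not] at hg
    have hnc0 : 0 ≤ nc := by
      have : (0 : Int) ≤ (cv.length : Int) := by positivity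
      omega
    have hn : nc = ((nc.toNat : Nat) : Int) := by omega
    have hlen : cv.length = 8 * nc.toNat := by omega
    congr 1
    -- B side
    have hB : (PySem.List.enumerate cv 0).foldl pvStepB (List.replicate nc.toNat 0)
        = pvChunkVals cv := pv_B nc.toNat cv hlen
    show String.ofList ((PySem.List.pyRange 0 nc 1).foldl
        (fun result character_number =>
          result ++ decode_single_char (PySem.List.slice cv
            (some (character_number * 8)) (some (character_number * 8 + 8)))) [])
      = String.ofList (((PySem.List.enumerate cv 0).foldl pvStepB
          (List.replicate nc.toNat 0)).map (fun c => Char.ofNat c.toNat))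
    rw [hB]
    congr 1
    rw [PySem.List.foldl_append_eq_flatMap, hn, PySem.List.pyRange_one]
    have hr : (((nc.toNat : Nat) : Int) - 0).toNat = nc.toNat := by omega
    rw [hr, List.flatMap_map]
    simp only [zero_add, List.nil_append]
    exact pv_A nc.toNat cv hlen
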